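-- pv_equiv track=rewrite | github.com/klark142/Introduction_to_Computer_Science | Zestaw_3/zad8.py | check
-- ===== SOURCE A (Python) =====
-- def check(tab):
--     mask = [False for _ in range(len(tab))]
--     mask[0] = True
--
--     for i, elem in enumerate(tab):
--         if mask[i] == True:
--             div = 2
--             while elem > 1:
--                 while elem % div == 0:
--                     if i + div < len(tab):
--                         mask[i + div] = True
--                     elem //= div
--                 div += 1
--     return mask[-1]
-- ===== SOURCE B (Python) =====
-- def check(tab):
--     # Faster re-implementation: each element is factored by trial division only up
--     # to sqrt(elem); the residual (a prime) is handled directly.  Marks i+p for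
--     # every distinct prime factor p of tab[i] at masked indices, exactly as A does.
--     n = len(tab)
--     mask = [False] * n
--     mask[0] = True
--     for i in range(n):
--         if not mask[i]:
--             continue
--         m = tab[i]
--         if m <= 1:
--             continue
--         p = 2
--         while p * p <= m:
--             if m % p == 0:
--                 if i + p < n:
--                     mask[i + p] = True
--                 while m % p == 0:
--                     m //= p
--             p += 1
--         if m > 1 and i + m < n:
--             mask[i + m] = True
--     return mask[-1]
-- ===== Notes on version B (the rewrite author's own statement) =====
-- stated objective: faster
-- what changed: A trial-divides each marked element with divisors all the way up to the element's largest prime factor; B trial-divides only up to sqrt(elem), stripping each found prime fully and handling the prime residual directly, marking i+p once per distinct prime factor (the mask effect is identical).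
import Mathlib
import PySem

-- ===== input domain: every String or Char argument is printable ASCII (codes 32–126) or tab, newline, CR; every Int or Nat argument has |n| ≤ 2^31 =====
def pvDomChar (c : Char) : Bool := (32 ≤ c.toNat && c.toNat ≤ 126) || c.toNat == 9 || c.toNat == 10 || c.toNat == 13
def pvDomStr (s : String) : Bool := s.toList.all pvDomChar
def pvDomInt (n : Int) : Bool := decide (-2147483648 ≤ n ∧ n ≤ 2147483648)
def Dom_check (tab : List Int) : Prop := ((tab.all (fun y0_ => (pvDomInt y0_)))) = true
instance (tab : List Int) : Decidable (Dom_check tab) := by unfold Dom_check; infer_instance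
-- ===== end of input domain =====

-- B changes the per-element factorisation: trial division only up to sqrt(elem) with the
-- prime residual handled directly, instead of A's divisor counter running to the largest
-- prime factor (objective: faster).

-- ===== PORT A =====
-- shared mask helper: 'if i + div < len(tab): mask[i + div] = True' folded over a list of divisors
def pvMark (n : Nat) (i : Int) (mask : List Bool) (ds : List Int) : List Bool :=
  ds.foldl (fun m d => if i + d < (n : Int) then PySem.List.pySetD m (i + d) true else m) mask

-- A's 'div = 2; while elem > 1: while elem % div == 0: …; div += 1' (the two nested whiles
-- written as one step function taking the same individual steps, made total by fuel)
def pvALoop : Nat → Int → Int → List Int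
  | 0, _, _ => []
  | f + 1, elem, div =>
    if 1 < elem then
      if PySem.Int.mod elem div = 0 then
        div :: pvALoop f (PySem.Int.floordiv elem div) div
      else pvALoop f elem (div + 1)
    else []

def check (tab : List Int) : Bool :=
  let n := tab.length
  let mask0 := PySem.List.pySetD (List.replicate n false) 0 true
  let mask := (PySem.List.enumerate tab 0).foldl
    (fun mask ie =>
      if PySem.List.pyGetD mask ie.1 false = true then
        pvMark n ie.1 mask (pvALoop (2 * ie.2).toNat ie.2 2)
      else mask) mask0
  -- final mask entry; Pre_check excludes the empty list, where Python raises IndexError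
  (PySem.List.pyGet? mask (-1)).getD false

-- ===== PORT B =====
-- B's inner 'while m % p == 0: m //= p' (fuel-totalised)
def pvStrip : Nat → Int → Int → Int
  | 0, m, _ => m
  | f + 1, m, p => if PySem.Int.mod m p = 0 then pvStrip f (PySem.Int.floordiv m p) p else m

-- B's 'p = 2; while p * p <= m: …; p += 1' returning the marked primes and the residual m
def pvBLoop : Nat → Int → Int → List Int × Int
  | 0, m, _ => ([], m)
  | f + 1, m, p =>
    if p * p ≤ m then
      if PySem.Int.mod m p = 0 then
        let m' := pvStrip m.toNat m p
        let pr := pvBLoop f m' (p + 1)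
        (p :: pr.1, pr.2)
      else pvBLoop f m (p + 1)
    else ([], m)

-- the divisors B marks for one element: distinct primes ≤ sqrt m, then the residual if > 1
def pvBMarks (m : Int) : List Int :=
  let pr := pvBLoop (2 * m).toNat m 2
  if 1 < pr.2 then pr.1 ++ [pr.2] else pr.1

def check_alt (tab : List Int) : Bool :=
  let n := tab.length
  let mask0 := PySem.List.pySetD (List.replicate n false) 0 true
  let mask := (PySem.List.pyRange 0 (n : Int) 1).foldl
    (fun mask i =>
      if PySem.List.pyGetD mask i false = true then
        let m := PySem.List.pyGetD tab i 0
        if 1 < m then pvMark n i mask (pvBMarks m) else mask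
      else mask) mask0
  (PySem.List.pyGet? mask (-1)).getD false

-- ===== PRECONDITION & SPEC =====
-- Pre_ excludes only the empty list, on which A raises IndexError when setting the first mask entry.
def Pre_check (tab : List Int) : Prop := tab ≠ []
instance (tab : List Int) : Decidable (Pre_check tab) := by unfold Pre_check; infer_instance
def pvWitness_check : List Int := [6, 10, 4, 15, 1, 9]
def Spec_check (tab : List Int) (out : Bool) : Prop := out = check_alt tab
instance (tab : List Int) (out : Bool) : Decidable (Spec_check tab out) := by unfold Spec_check; infer_instance

-- ===== CLAIM (what is proved, stated in full; the proofs are below) =====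
def Claim_equal_check : Prop := ∀ (tab : List Int), Dom_check tab → Pre_check tab → Spec_check tab (check tab)

-- ===== LEMMAS AND PROOFS =====

theorem pv_natdvd (m : Int) (hm : 0 < m) (q : Nat) (h : q ∣ m.natAbs) : (q : Int) ∣ m := by
  have h1 : (q : Int) ∣ (m.natAbs : Int) := Int.natCast_dvd_natCast.mpr h
  have : (m.natAbs : Int) = m := by omega
  rwa [this] at h1

-- a divisor d ≥ 2 of m with no divisor of m in [2, d) is prime
theorem pv_prime_of_least (m d : Int) (hd : 2 ≤ d) (hdvd : d ∣ m) (_hm : 1 < m)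
    (hmin : ∀ k : Int, 2 ≤ k → k < d → ¬ k ∣ m) : Prime d := by
  have hne : d.natAbs ≠ 1 := by omega
  have qp := Nat.minFac_prime hne
  have hqd : (d.natAbs.minFac : Int) ∣ d := pv_natdvd d (by omega) _ (Nat.minFac_dvd _)
  have hqm : (d.natAbs.minFac : Int) ∣ m := hqd.trans hdvd
  have hqle : d.natAbs.minFac ≤ d.natAbs := Nat.minFac_le (by omega)
  have hge : ¬ ((d.natAbs.minFac : Int) < d) := fun hlt => hmin _ (by exact_mod_cast qp.two_le) hlt hqm
  have heq : d.natAbs.minFac = d.natAbs := by omega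
  rw [Int.prime_iff_natAbs_prime]
  rwa [heq] at qp

-- if m > 1 has no divisor in [2, d) then d ≤ m (m's least prime factor is ≥ d and ≤ m)
theorem pv_d_le_m (m d : Int) (hm : 1 < m) (_hd : 2 ≤ d)
    (hmin : ∀ k : Int, 2 ≤ k → k < d → ¬ k ∣ m) : d ≤ m := by
  have hq := Nat.minFac_prime (n := m.natAbs) (by omega)
  have hqm : (m.natAbs.minFac : Int) ∣ m := pv_natdvd m (by omega) _ (Nat.minFac_dvd _)
  have hge : ¬ ((m.natAbs.minFac : Int) < d) := fun hlt => hmin _ (by exact_mod_cast hq.two_le) hlt hqm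
  have hqle : m.natAbs.minFac ≤ m.natAbs := Nat.minFac_le (by omega)
  omega

-- if m > 1 has no divisor in [2, p) and p*p > m then m is prime
theorem pv_prime_of_no_small (m p : Int) (hm : 1 < m) (hp : 2 ≤ p) (hpp : m < p * p)
    (hmin : ∀ k : Int, 2 ≤ k → k < p → ¬ k ∣ m) : Prime m := by
  rw [Int.prime_iff_natAbs_prime]
  by_contra hnp
  have hq := Nat.minFac_prime (n := m.natAbs) (by omega)
  have hsq : m.natAbs.minFac * m.natAbs.minFac ≤ m.natAbs := by
    have := Nat.minFac_sq_le_self (n := m.natAbs) (by omega) hnp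
    nlinarith [this]
  have hqm : (m.natAbs.minFac : Int) ∣ m := pv_natdvd m (by omega) _ (Nat.minFac_dvd _)
  have hq2 : 2 ≤ m.natAbs.minFac := hq.two_le
  have hge : ¬ ((m.natAbs.minFac : Int) < p) := fun hlt => hmin _ (by omega) hlt hqm
  push Not at hge
  have h1 : p * p ≤ (m.natAbs.minFac : Int) * m.natAbs.minFac := by
    have : (0:Int) < p := by omega
    nlinarith
  have hcast : ((m.natAbs.minFac * m.natAbs.minFac : Nat) : Int) ≤ (m.natAbs : Int) := by
    exact_mod_cast hsq
  push_cast at hcast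
  omega

-- positive primes dividing each other are equal
theorem pv_prime_dvd_prime (x p : Int) (hx : Prime x) (hxp : 0 < x) (hp : Prime p)
    (hpp : 0 < p) (h : x ∣ p) : x = p := by
  have h1 : x.natAbs ∣ p.natAbs := Int.natAbs_dvd_natAbs.mpr h
  have hp' : Nat.Prime p.natAbs := Int.prime_iff_natAbs_prime.mp hp
  have hx' : Nat.Prime x.natAbs := Int.prime_iff_natAbs_prime.mp hx
  have := hp'.eq_one_or_self_of_dvd _ h1
  have := hx'.two_le
  omega

theorem pv_two_mul_le_of_dvd_ne (r m : Int) (hr : 0 < r) (hm : 0 < m) (hdvd : r ∣ m)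
    (hne : r ≠ m) : 2 * r ≤ m := by
  obtain ⟨k, hk⟩ := hdvd
  have hkpos : 0 < k := by nlinarith
  have hk2 : 2 ≤ k := by
    rcases Int.lt_or_le k 2 with h | h
    · exfalso; have : k = 1 := by omega
      simp [this] at hk; omega
    · exact h
  nlinarith

-- A's loop collects exactly the positive prime divisors of m (with multiplicity)
theorem pvALoop_mem (f : Nat) : ∀ (m d : Int), 1 ≤ m → 2 ≤ d →
    (∀ k : Int, 2 ≤ k → k < d → ¬ k ∣ m) → (2 * m - d).toNat < f →
    ∀ x, x ∈ pvALoop f m d ↔ (Prime x ∧ x ∣ m ∧ 0 < x) := by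
  induction f with
  | zero => intro m d h1 h2 _ hf; omega
  | succ f ih =>
    intro m d hm hd hmin hf x
    by_cases h1 : 1 < m
    · have hdm' : d ≤ m := pv_d_le_m m d h1 hd hmin
      by_cases hmod : PySem.Int.mod m d = 0
      · have hdm : d ∣ m := (PySem.Int.mod_eq_zero_iff_dvd m d).mp hmod
        have hpd : Prime d := pv_prime_of_least m d hd hdm h1 hmin
        have hfl : PySem.Int.floordiv m d = m / d := PySem.Int.floordiv_eq_ediv_of_pos (by omega)
        have hmd : m = d * (m / d) := (Int.mul_ediv_cancel' hdm).symm
        have hq1 : 1 ≤ m / d := by nlinarith [hmd]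
        have hq2 : 2 * (m / d) ≤ m := by nlinarith [hmd]
        have hdvdq : m / d ∣ m := ⟨d, by linarith [hmd]⟩
        simp only [pvALoop, if_pos h1, if_pos hmod, List.mem_cons, hfl]
        rw [ih (m / d) d hq1 hd (fun k hk2 hkd hkdvd => hmin k hk2 hkd (hkdvd.trans hdvdq)) (by omega)]
        constructor
        · rintro (rfl | ⟨px, pdvd, ppos⟩)
          · exact ⟨hpd, hdm, by omega⟩
          · exact ⟨px, pdvd.trans hdvdq, ppos⟩
        · rintro ⟨px, pdvd, ppos⟩
          by_cases hxd : x = d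
          · exact Or.inl hxd
          · refine Or.inr ⟨px, ?_, ppos⟩
            rw [hmd] at pdvd
            rcases (Prime.dvd_mul px).mp pdvd with h | h
            · exact absurd (pv_prime_dvd_prime x d px ppos hpd (by omega) h) hxd
            · exact h
      · have hndvd : ¬ d ∣ m := fun h => hmod ((PySem.Int.mod_eq_zero_iff_dvd m d).mpr h)
        simp only [pvALoop, if_pos h1, if_neg hmod]
        apply ih m (d + 1) hm (by omega)
          (fun k hk2 hkd hkdvd => by
            rcases Int.lt_or_le k d with h | h
            · exact hmin k hk2 h hkdvd
            · have : k = d := by omega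
              exact hndvd (this ▸ hkdvd))
          (by omega)
    · simp only [pvALoop, if_neg h1, List.not_mem_nil, false_iff]
      rintro ⟨px, pdvd, ppos⟩
      have : m = 1 := by omega
      rw [this] at pdvd
      exact px.not_unit (isUnit_of_dvd_one pdvd)

-- B's inner strip removes exactly the powers of the prime p
theorem pvStrip_spec (f : Nat) : ∀ (m p : Int), 1 ≤ m → 2 ≤ p → Prime p → m.toNat ≤ f →
    1 ≤ pvStrip f m p ∧ ¬ p ∣ pvStrip f m p ∧ pvStrip f m p ∣ m ∧
    (∀ x : Int, Prime x → 0 < x → x ∣ m → x = p ∨ x ∣ pvStrip f m p) := by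
  induction f with
  | zero => intro m p h1 _ _ hf; omega
  | succ f ih =>
    intro m p hm hp hpp hf
    by_cases hmod : PySem.Int.mod m p = 0
    · have hdm : p ∣ m := (PySem.Int.mod_eq_zero_iff_dvd m p).mp hmod
      have hfl : PySem.Int.floordiv m p = m / p := PySem.Int.floordiv_eq_ediv_of_pos (by omega)
      have hmd : m = p * (m / p) := (Int.mul_ediv_cancel' hdm).symm
      have hq1 : 1 ≤ m / p := by nlinarith [hmd]
      have hq2 : 2 * (m / p) ≤ m := by nlinarith [hmd]
      have hdvdq : m / p ∣ m := ⟨p, by linarith [hmd]⟩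
      obtain ⟨ih1, ih2, ih3, ih4⟩ := ih (m / p) p hq1 hp hpp (by omega)
      simp only [pvStrip, if_pos hmod, hfl]
      refine ⟨ih1, ih2, ih3.trans hdvdq, fun x px hxpos hxm => ?_⟩
      rw [hmd] at hxm
      rcases (Prime.dvd_mul px).mp hxm with h | h
      · exact Or.inl (pv_prime_dvd_prime x p px hxpos hpp (by omega) h)
      · exact ih4 x px hxpos h
    · have hndvd : ¬ p ∣ m := fun h => hmod ((PySem.Int.mod_eq_zero_iff_dvd m p).mpr h)
      simp only [pvStrip, if_neg hmod]
      exact ⟨hm, hndvd, dvd_refl m, fun x _ _ hxm => Or.inr hxm⟩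

-- B's outer loop: collected primes plus the residual (if > 1) are exactly the
-- positive prime divisors of m
theorem pvBLoop_spec (f : Nat) : ∀ (m p : Int), 1 ≤ m → 2 ≤ p →
    (∀ k : Int, 2 ≤ k → k < p → ¬ k ∣ m) → (2 * m - p).toNat < f →
    1 ≤ (pvBLoop f m p).2 ∧
    (∀ x, (x ∈ (pvBLoop f m p).1 ∨ (1 < (pvBLoop f m p).2 ∧ x = (pvBLoop f m p).2)) ↔
      (Prime x ∧ x ∣ m ∧ 0 < x)) := by
  induction f with
  | zero => intro m p h1 h2 _ hf; omega
  | succ f ih =>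
    intro m p hm hp hmin hf
    by_cases hsq : p * p ≤ m
    · have hm1 : 1 < m := by nlinarith
      by_cases hmod : PySem.Int.mod m p = 0
      · have hdm : p ∣ m := (PySem.Int.mod_eq_zero_iff_dvd m p).mp hmod
        have hpp : Prime p := pv_prime_of_least m p hp hdm hm1 hmin
        obtain ⟨hs1, hs2, hs3, hs4⟩ := pvStrip_spec m.toNat m p hm hp hpp (le_refl _)
        set r0 := pvStrip m.toNat m p with hr0
        have hne : r0 ≠ m := fun h => hs2 (h ▸ hdm)
        have h2r : 2 * r0 ≤ m := pv_two_mul_le_of_dvd_ne r0 m (by omega) (by omega) hs3 hne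
        have hmin' : ∀ k : Int, 2 ≤ k → k < p + 1 → ¬ k ∣ r0 := by
          intro k hk2 hkp hkdvd
          rcases Int.lt_or_le k p with h | h
          · exact hmin k hk2 h (hkdvd.trans hs3)
          · have : k = p := by omega
            exact hs2 (this ▸ hkdvd)
        have hplem : p ≤ m := by nlinarith
        obtain ⟨ih1, ih2⟩ := ih r0 (p + 1) hs1 (by omega) hmin' (by omega)
        have hunf : pvBLoop (f + 1) m p = (p :: (pvBLoop f r0 (p + 1)).1, (pvBLoop f r0 (p + 1)).2) := by
          rw [hr0]; simp only [pvBLoop, if_pos hsq, if_pos hmod]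
        rw [hunf]
        refine ⟨ih1, fun x => ?_⟩
        simp only [List.mem_cons]
        rw [show ((x = p ∨ x ∈ (pvBLoop f r0 (p + 1)).1) ∨
              1 < (pvBLoop f r0 (p + 1)).2 ∧ x = (pvBLoop f r0 (p + 1)).2) ↔
            (x = p ∨ (x ∈ (pvBLoop f r0 (p + 1)).1 ∨
              1 < (pvBLoop f r0 (p + 1)).2 ∧ x = (pvBLoop f r0 (p + 1)).2)) by tauto]
        rw [ih2 x]
        constructor
        · rintro (rfl | ⟨px, pdvd, ppos⟩)
          · exact ⟨hpp, hdm, by omega⟩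
          · exact ⟨px, pdvd.trans hs3, ppos⟩
        · rintro ⟨px, pdvd, ppos⟩
          rcases hs4 x px ppos pdvd with h | h
          · exact Or.inl h
          · exact Or.inr ⟨px, h, ppos⟩
      · have hndvd : ¬ p ∣ m := fun h => hmod ((PySem.Int.mod_eq_zero_iff_dvd m p).mpr h)
        have hunf : pvBLoop (f + 1) m p = pvBLoop f m (p + 1) := by
          simp only [pvBLoop, if_pos hsq, if_neg hmod]
        rw [hunf]
        have hplem : p ≤ m := by nlinarith
        apply ih m (p + 1) hm (by omega)
          (fun k hk2 hkp hkdvd => by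
            rcases Int.lt_or_le k p with h | h
            · exact hmin k hk2 h hkdvd
            · have : k = p := by omega
              exact hndvd (this ▸ hkdvd))
          (by omega)
    · have hunf : pvBLoop (f + 1) m p = ([], m) := by
        simp only [pvBLoop, if_neg hsq]
      rw [hunf]
      refine ⟨hm, fun x => ?_⟩
      simp only [List.not_mem_nil, false_or]
      constructor
      · rintro ⟨hm1, rfl⟩
        exact ⟨pv_prime_of_no_small x p hm1 hp (by omega) hmin, dvd_refl x, by omega⟩
      · rintro ⟨px, pdvd, ppos⟩
        by_cases hm1 : 1 < m
        · have hpm : Prime m := pv_prime_of_no_small m p hm1 hp (by omega) hmin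
          exact ⟨hm1, pv_prime_dvd_prime x m px ppos hpm (by omega) pdvd⟩
        · exfalso
          have : m = 1 := by omega
          rw [this] at pdvd
          exact px.not_unit (isUnit_of_dvd_one pdvd)

theorem pvA_marks_spec (m : Int) (hm : 1 < m) :
    ∀ x, x ∈ pvALoop (2 * m).toNat m 2 ↔ (Prime x ∧ x ∣ m ∧ 0 < x) :=
  pvALoop_mem (2 * m).toNat m 2 (by omega) (by omega) (fun k hk2 hkd => by omega) (by omega)

theorem pvB_marks_spec (m : Int) (hm : 1 < m) :
    ∀ x, x ∈ pvBMarks m ↔ (Prime x ∧ x ∣ m ∧ 0 < x) := by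
  intro x
  obtain ⟨h1, h2⟩ := pvBLoop_spec (2 * m).toNat m 2 (by omega) (by omega)
    (fun k hk2 hkd => by omega) (by omega)
  rw [← h2 x]
  unfold pvBMarks
  by_cases hr : 1 < (pvBLoop (2 * m).toNat m 2).2
  · simp [hr]
  · simp [hr]

-- both mark lists hold the same divisors, all positive
theorem pv_marks_same_mem (m : Int) (hm : 1 < m) :
    ∀ x, x ∈ pvALoop (2 * m).toNat m 2 ↔ x ∈ pvBMarks m := by
  intro x; rw [pvA_marks_spec m hm x, pvB_marks_spec m hm x]

theorem pvA_marks_pos (m : Int) (hm : 1 < m) :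
    ∀ x ∈ pvALoop (2 * m).toNat m 2, 1 ≤ x := by
  intro x hx
  have := (pvA_marks_spec m hm x).mp hx
  omega

theorem pvB_marks_pos (m : Int) (hm : 1 < m) : ∀ x ∈ pvBMarks m, 1 ≤ x := by
  intro x hx
  have := (pvB_marks_spec m hm x).mp hx
  omega

-- A's loop does nothing for elem ≤ 1
theorem pvALoop_le_one (m : Int) (hm : ¬ 1 < m) : pvALoop (2 * m).toNat m 2 = [] := by
  cases hf : (2 * m).toNat with
  | zero => rfl
  | succ f => simp [pvALoop, hm]

theorem pvMark_nil (n : Nat) (i : Int) (mask : List Bool) : pvMark n i mask [] = mask := rfl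

-- marking preserves the mask's length
theorem pvMark_length (n : Nat) (i : Int) : ∀ (ds : List Int) (mask : List Bool),
    (pvMark n i mask ds).length = mask.length := by
  intro ds
  induction ds with
  | nil => intro mask; rfl
  | cons d ds ih =>
    intro mask
    show (pvMark n i _ ds).length = _
    rw [ih]
    dsimp only
    split
    · exact PySem.List.length_pySetD _ _ _
    · rfl

-- pointwise description of the marking fold
theorem pvMark_getElem? (n : Nat) (i : Int) (hi : 0 ≤ i) :
    ∀ (ds : List Int) (mask : List Bool), (∀ d ∈ ds, 1 ≤ d) → mask.length = n →
    ∀ j : Nat, (pvMark n i mask ds)[j]? =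
      if ∃ d ∈ ds, i + d = (j : Int) ∧ (j : Int) < (n : Int) then some true else mask[j]? := by
  intro ds
  induction ds with
  | nil => intro mask _ _ j; simp [pvMark_nil]
  | cons d ds ih =>
    intro mask hpos hlen j
    have hd1 : 1 ≤ d := hpos d (List.mem_cons_self)
    have step : pvMark n i mask (d :: ds) =
        pvMark n i (if i + d < (n : Int) then PySem.List.pySetD mask (i + d) true else mask) ds := rfl
    rw [step]
    by_cases hlt : i + d < (n : Int)
    · rw [if_pos hlt]
      have hset : PySem.List.pySetD mask (i + d) true = mask.set (i + d).toNat true :=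
        PySem.List.pySetD_of_nonneg _ _ (by omega)
      rw [ih _ (fun e he => hpos e (List.mem_cons_of_mem _ he)) (by rw [hset]; simp [hlen])]
      by_cases hds : ∃ e ∈ ds, i + e = (j : Int) ∧ (j : Int) < (n : Int)
      · rw [if_pos hds, if_pos ⟨_, List.mem_cons_of_mem _ hds.choose_spec.1, hds.choose_spec.2⟩]
      · rw [if_neg hds, hset]
        by_cases hj : i + d = (j : Int)
        · have hjn : (j : Int) < n := by omega
          rw [if_pos ⟨d, List.mem_cons_self, hj, hjn⟩]
          have : (i + d).toNat = j := by omega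
          rw [this]
          rw [List.getElem?_set_self (by omega)]
        · have : ¬ ∃ e ∈ d :: ds, i + e = (j : Int) ∧ (j : Int) < (n : Int) := by
            rintro ⟨e, he, h1, h2⟩
            rcases List.mem_cons.mp he with rfl | he'
            · exact hj h1
            · exact hds ⟨e, he', h1, h2⟩
          rw [if_neg this]
          rw [List.getElem?_set_ne]
          omega
    · rw [if_neg hlt]
      rw [ih mask (fun e he => hpos e (List.mem_cons_of_mem _ he)) hlen]
      by_cases hds : ∃ e ∈ ds, i + e = (j : Int) ∧ (j : Int) < (n : Int)
      · rw [if_pos hds, if_pos ⟨_, List.mem_cons_of_mem _ hds.choose_spec.1, hds.choose_spec.2⟩]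
      · rw [if_neg hds]
        have : ¬ ∃ e ∈ d :: ds, i + e = (j : Int) ∧ (j : Int) < (n : Int) := by
          rintro ⟨e, he, h1, h2⟩
          rcases List.mem_cons.mp he with rfl | he'
          · omega
          · exact hds ⟨e, he', h1, h2⟩
        rw [if_neg this]

-- the fold's result only depends on the SET of divisors marked
theorem pvMark_congr (n : Nat) (i : Int) (hi : 0 ≤ i) (ds₁ ds₂ : List Int)
    (h₁ : ∀ d ∈ ds₁, 1 ≤ d) (h₂ : ∀ d ∈ ds₂, 1 ≤ d) (hmem : ∀ x, x ∈ ds₁ ↔ x ∈ ds₂)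
    (mask : List Bool) (hlen : mask.length = n) :
    pvMark n i mask ds₁ = pvMark n i mask ds₂ := by
  apply List.ext_getElem?
  intro j
  rw [pvMark_getElem? n i hi ds₁ mask h₁ hlen j, pvMark_getElem? n i hi ds₂ mask h₂ hlen j]
  congr 1
  simp only [eq_iff_iff]
  constructor <;> rintro ⟨e, he, h⟩
  · exact ⟨e, (hmem e).mp he, h⟩
  · exact ⟨e, (hmem e).mpr he, h⟩

-- generic foldl congruence carrying an invariant
theorem pv_foldl_inv {α β : Type} (P : β → Prop) (f g : β → α → β) :
    ∀ (l : List α) (acc : β), P acc →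
    (∀ a ∈ l, ∀ b, P b → f b a = g b a ∧ P (f b a)) →
    l.foldl f acc = l.foldl g acc := by
  intro l
  induction l with
  | nil => intro acc _ _; rfl
  | cons a l ih =>
    intro acc hP hstep
    obtain ⟨heq, hP'⟩ := hstep a List.mem_cons_self acc hP
    show (l.foldl f (f acc a)) = (l.foldl g (g acc a))
    rw [← heq]
    exact ih (f acc a) hP' (fun x hx => hstep x (List.mem_cons_of_mem _ hx))

-- ===== VERDICT (by name: the statement is the Claim_ definition above) =====
theorem check_spec : Claim_equal_check := by
  intro tab _ _
  unfold Spec_check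
  simp only [check, check_alt]
  have henum := PySem.List.enumerate_eq_map_pyRange (xs := tab) (d := (0 : Int))
  rw [henum, List.foldl_map]
  have hlen' : PySem.List.len tab = (tab.length : Int) := rfl
  rw [hlen']
  congr 2
  dsimp only
  apply pv_foldl_inv (fun mask => mask.length = tab.length)
  · simp [PySem.List.length_pySetD]
  · intro i hi mask hlen
    have hib : 0 ≤ i ∧ i < (tab.length : Int) := (PySem.List.mem_pyRange_one).mp hi
    set m := PySem.List.pyGetD tab i 0 with hm
    constructor
    · by_cases hmask : PySem.List.pyGetD mask i false = true
      · rw [if_pos hmask, if_pos hmask]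
        by_cases h1 : 1 < m
        · rw [if_pos h1]
          exact pvMark_congr tab.length i (by omega) _ _ (pvA_marks_pos m h1)
            (pvB_marks_pos m h1) (pv_marks_same_mem m h1) mask hlen
        · rw [if_neg h1, pvALoop_le_one m h1, pvMark_nil]
      · rw [if_neg hmask, if_neg hmask]
    · by_cases hmask : PySem.List.pyGetD mask i false = true
      · rw [if_pos hmask, pvMark_length, hlen]
      · rw [if_neg hmask, hlen]
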